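-- pv_equiv track=rewrite | github.com/sanjithvgs/Python | Count_pair_sum.py | solve
-- ===== SOURCE A (Python) =====
-- def solve(A, B):
--   freq_dict={}
--   result_count=0
--   for ind in range(len(A)):
--       if B-A[ind] in freq_dict:
--           result_count+=freq_dict[B-A[ind]]
--       if A[ind] in freq_dict:
--           freq_dict[A[ind]]+=1
--       else:
--           freq_dict[A[ind]]=1
--   return result_count % (10**9 + 7)
-- ===== SOURCE B (Python) =====
-- def solve(A, B):
--     freq = {}
--     for x in A:
--         freq[x] = freq.get(x, 0) + 1
--     total = 0
--     for v, c in freq.items():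
--         w = B - v
--         if v < w:
--             total += c * freq.get(w, 0)
--         elif v == w:
--             total += c * (c - 1) // 2
--     return total % (10**9 + 7)
-- ===== Notes on version B (the rewrite author's own statement) =====
-- stated objective: alternative
-- what changed: Replaces A's interleaved scan (look up B-x in the running dict, then increment x's count, accumulating as it goes) by two separate phases: build a complete frequency table in one pass, then iterate over the distinct values, adding freq[v]*freq[B-v] for v < B-v and C(freq[v],2) for 2v == B.
import Mathlib
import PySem

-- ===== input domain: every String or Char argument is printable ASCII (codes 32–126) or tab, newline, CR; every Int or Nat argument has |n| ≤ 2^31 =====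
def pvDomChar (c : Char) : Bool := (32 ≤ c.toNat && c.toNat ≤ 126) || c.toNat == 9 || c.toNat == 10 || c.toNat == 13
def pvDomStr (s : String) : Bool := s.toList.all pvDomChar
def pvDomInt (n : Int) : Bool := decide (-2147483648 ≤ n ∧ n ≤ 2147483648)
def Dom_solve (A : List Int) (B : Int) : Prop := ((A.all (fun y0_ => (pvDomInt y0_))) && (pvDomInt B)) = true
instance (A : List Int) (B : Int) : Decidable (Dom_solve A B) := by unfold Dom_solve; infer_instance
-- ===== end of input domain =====

-- B replaces A's interleaved count-then-insert scan by a frequency-table build followed by a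
-- combinatorial pass over the distinct values (cross products for v < B-v, C(c,2) self-pairs).

-- ===== PORT A =====
def solve (A : List Int) (B : Int) : Int :=
  let st := (PySem.List.pyRange 0 (A.length : Int) 1).foldl
    (fun (st : PySem.Dict Int Int × Int) ind =>
      let a := PySem.List.pyGetD A ind 0
      let st1 : PySem.Dict Int Int × Int :=
        if st.1.contains (B - a) then (st.1, st.2 + st.1.getD (B - a) 0) else st
      if st1.1.contains a then (st1.1.insert a (st1.1.getD a 0 + 1), st1.2)
      else (st1.1.insert a 1, st1.2))
    (PySem.Dict.empty, 0)
  st.2 % (10 ^ 9 + 7)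

-- ===== PORT B =====
def solve_alt (A : List Int) (B : Int) : Int :=
  let freq := A.foldl (fun (d : PySem.Dict Int Int) x => d.insert x (d.getD x 0 + 1)) PySem.Dict.empty
  let total := freq.items.foldl (fun tot p =>
      if p.1 < B - p.1 then tot + p.2 * freq.getD (B - p.1) 0
      else if p.1 = B - p.1 then tot + PySem.Int.floordiv (p.2 * (p.2 - 1)) 2
      else tot) 0
  total % (10 ^ 9 + 7)

-- ===== PRECONDITION & SPEC =====
def Spec_solve (A : List Int) (B : Int) (out : Int) : Prop := out = solve_alt A B
instance (A : List Int) (B : Int) (out : Int) : Decidable (Spec_solve A B out) := by unfold Spec_solve; infer_instance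

-- ===== CLAIM (what is proved, stated in full; the proofs are below) =====
def Claim_equal_solve : Prop := ∀ (A : List Int) (B : Int), Dom_solve A B → Spec_solve A B (solve A B)

-- ===== LEMMAS AND PROOFS =====

-- number of index pairs i < j with A[i] + A[j] = B (head element paired with each later partner)
def pairCount (B : Int) : List Int → Int
  | [] => 0
  | x :: t => (t.count (B - x) : Int) + pairCount B t

-- the contribution of one distinct value v that B's second pass adds
def Fc (l : List Int) (B v : Int) : Int :=
  if v < B - v then (l.count v : Int) * (l.count (B - v) : Int)
  else if v = B - v then PySem.Int.floordiv ((l.count v : Int) * ((l.count v : Int) - 1)) 2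
  else 0

-- ---- the A side: the interleaved scan computes pairCount ----

theorem stepA_eq (B : Int) (st : PySem.Dict Int Int × Int) (x : Int) :
    (let st1 : PySem.Dict Int Int × Int :=
        if st.1.contains (B - x) then (st.1, st.2 + st.1.getD (B - x) 0) else st
      if st1.1.contains x then (st1.1.insert x (st1.1.getD x 0 + 1), st1.2)
      else (st1.1.insert x 1, st1.2))
    = (st.1.insert x (st.1.getD x 0 + 1), st.2 + st.1.getD (B - x) 0) := by
  by_cases h1 : st.1.contains (B - x) <;>
    by_cases h2 : st.1.contains x <;>
      simp [h1, h2, PySem.Dict.getD_of_not_contains] at *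

theorem sum_map_indicator (B x : Int) (s : List Int) :
    (s.map (fun y => if y = B - x then (1:Int) else 0)).sum = (s.count (B - x) : Int) := by
  induction s with
  | nil => simp
  | cons a s ihs =>
    simp only [List.map_cons, List.sum_cons, List.count_cons, ihs]
    by_cases h : a = B - x
    · simp [h]; ring
    · have : (B - x == a) = false := by simp [Ne.symm h]
      simp [h, this]

theorem A_loop (B : Int) (l : List Int) :
    ∀ (d : PySem.Dict Int Int) (c : Int),
    (l.foldl (fun (st : PySem.Dict Int Int × Int) x =>
        let st1 : PySem.Dict Int Int × Int :=
          if st.1.contains (B - x) then (st.1, st.2 + st.1.getD (B - x) 0) else st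
        if st1.1.contains x then (st1.1.insert x (st1.1.getD x 0 + 1), st1.2)
        else (st1.1.insert x 1, st1.2)) (d, c)).2
      = c + ((l.map (fun y => d.getD (B - y) 0)).sum) + pairCount B l := by
  induction l with
  | nil => intro d c; simp [pairCount]
  | cons x t ih =>
    intro d c
    rw [List.foldl_cons, stepA_eq B (d, c) x, ih]
    have hmap : (t.map (fun y => (d.insert x (d.getD x 0 + 1)).getD (B - y) 0))
        = t.map (fun y => d.getD (B - y) 0 + (if y = B - x then 1 else 0)) := by
      apply List.map_congr_left
      intro y _
      rw [PySem.Dict.getD_insert]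
      by_cases h : B - y = x
      · have h' : y = B - x := by omega
        rw [if_pos h, if_pos h', show B - y = x from h]
      · have h' : ¬ (y = B - x) := by omega
        rw [if_neg h, if_neg h', add_zero]
    rw [hmap, PySem.List.sum_map_add_int, sum_map_indicator]
    simp only [pairCount, List.map_cons, List.sum_cons]
    ring

theorem solve_eq_pairCount (A : List Int) (B : Int) :
    solve A B = pairCount B A % (10 ^ 9 + 7) := by
  have h1 : solve A B = ((A.foldl (fun (st : PySem.Dict Int Int × Int) x =>
      let st1 : PySem.Dict Int Int × Int :=
        if st.1.contains (B - x) then (st.1, st.2 + st.1.getD (B - x) 0) else st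
      if st1.1.contains x then (st1.1.insert x (st1.1.getD x 0 + 1), st1.2)
      else (st1.1.insert x 1, st1.2)) (PySem.Dict.empty, 0)).2) % (10 ^ 9 + 7) := by
    unfold solve
    rw [PySem.List.foldl_pyRange_zero_pyGetD' A 0
      (fun (st : PySem.Dict Int Int × Int) (x : Int) =>
        let st1 : PySem.Dict Int Int × Int :=
          if st.1.contains (B - x) then (st.1, st.2 + st.1.getD (B - x) 0) else st
        if st1.1.contains x then (st1.1.insert x (st1.1.getD x 0 + 1), st1.2)
        else (st1.1.insert x 1, st1.2)) (PySem.Dict.empty, 0)]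
  rw [h1, A_loop B A PySem.Dict.empty 0]
  simp [PySem.Dict.getD_empty]

-- ---- the B side: the combinatorial pass computes pairCount as well ----

theorem fd_step (c : Int) :
    PySem.Int.floordiv ((c + 1) * c) 2 = PySem.Int.floordiv (c * (c - 1)) 2 + c := by
  obtain ⟨k, hk⟩ : Even ((c - 1) * c) := by
    have := Int.even_mul_succ_self (c - 1); simpa using this
  have h1 : PySem.Int.floordiv (c * (c - 1)) 2 = k := by
    rw [PySem.Int.floordiv_eq_iff_of_pos (by norm_num)]
    constructor <;> nlinarith [hk]
  have h2 : PySem.Int.floordiv ((c + 1) * c) 2 = k + c := by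
    rw [PySem.Int.floordiv_eq_iff_of_pos (by norm_num)]
    constructor <;> nlinarith [hk]
  rw [h1, h2]

theorem count_append_singleton (l : List Int) (x v : Int) :
    ((l ++ [x]).count v : Int) = (l.count v : Int) + (if v = x then 1 else 0) := by
  rw [List.count_append]
  have h0 : List.count v [x] = if v = x then 1 else 0 := by
    by_cases h : v = x <;> simp [List.count_singleton', h, eq_comm] <;> omega
  rw [h0]
  split_ifs <;> push_cast <;> ring

theorem Fc_append (l : List Int) (B x v : Int) :
    Fc (l ++ [x]) B v = Fc l B v +
      (if v = x then
        (if x < B - x then (l.count (B - x) : Int)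
         else if x = B - x then (l.count x : Int) else 0)
       else if v = B - x then (if B - x < x then (l.count (B - x) : Int) else 0)
       else 0) := by
  unfold Fc
  by_cases hvx : v = x
  · subst hvx
    by_cases h1 : v < B - v
    · have hne : ¬ (B - v = v) := by omega
      rw [if_pos h1, if_pos h1, if_pos rfl, if_pos h1]
      rw [count_append_singleton, count_append_singleton, if_pos rfl, if_neg hne]
      push_cast
      ring
    · by_cases h2 : v = B - v
      · rw [if_neg h1, if_neg h1, if_pos h2, if_pos h2, if_pos rfl, if_neg h1, if_pos h2]
        rw [count_append_singleton, if_pos rfl]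
        have := fd_step ((l.count v : Int))
        have harg : ((l.count v : Int) + 1) * ((l.count v : Int) + 1 - 1)
            = ((l.count v : Int) + 1) * (l.count v : Int) := by ring
        rw [harg, this]
      · rw [if_neg h1, if_neg h1, if_neg h2, if_neg h2, if_pos rfl, if_neg h1, if_neg h2]
        ring
  · by_cases hvw : v = B - x
    · have hbv : B - v = x := by omega
      by_cases h1 : v < B - v
      · rw [if_pos h1, if_pos h1, if_neg hvx, if_pos hvw, if_pos (by omega : B - x < x)]
        rw [count_append_singleton, count_append_singleton, if_neg hvx, if_pos hbv]
        rw [show B - x = v from hvw.symm]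
        ring
      · by_cases h2 : v = B - v
        · exact absurd (by omega : v = x) hvx
        · rw [if_neg h1, if_neg h1, if_neg h2, if_neg h2, if_neg hvx, if_pos hvw,
            if_neg (by omega : ¬ B - x < x)]
          ring
    · have hbv : ¬ (B - v = x) := by omega
      rw [count_append_singleton, count_append_singleton, if_neg hvx, if_neg hbv,
        if_neg hvx, if_neg hvw]
      simp

theorem sum_map_two_ite (D : List Int) (hnd : D.Nodup) (x w a b : Int) :
    (D.map (fun v => if v = x then a else if v = w then b else 0)).sum
      = (if x ∈ D then a else 0) + (if w ∈ D ∧ w ≠ x then b else 0) := by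
  induction D with
  | nil => simp
  | cons v t ih =>
    rw [List.nodup_cons] at hnd
    obtain ⟨hv, hnd⟩ := hnd
    rw [List.map_cons, List.sum_cons, ih hnd]
    simp only [List.mem_cons]
    by_cases h1 : v = x <;> by_cases h2 : v = w <;> by_cases h5 : w = x <;>
      by_cases h3 : x ∈ t <;> by_cases h4 : w ∈ t <;>
        split_ifs <;> simp_all <;> ring

theorem dedup_append_singleton (l : List Int) (x : Int) :
    PySem.List.dedup (l ++ [x])
      = if x ∈ l then PySem.List.dedup l else PySem.List.dedup l ++ [x] := by
  simp only [PySem.List.dedup_eq_ofList, PySem.Set.ofList_eq_foldl, List.foldl_append,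
    List.foldl_cons, List.foldl_nil]
  rw [PySem.Set.add]
  have h : (List.foldl PySem.Set.add [] l).contains x = true ↔ x ∈ l := by
    rw [← PySem.Set.ofList_eq_foldl]
    simp [PySem.Set.contains, PySem.Set.mem_ofList]
  by_cases hx : x ∈ l
  · rw [if_pos (h.mpr hx), if_pos hx]
  · rw [if_neg (fun hc => hx (h.mp hc)), if_neg hx]

theorem pairCount_append (B : Int) (l : List Int) (x : Int) :
    pairCount B (l ++ [x]) = pairCount B l + (l.count (B - x) : Int) := by
  induction l with
  | nil => simp [pairCount]
  | cons y t ih =>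
    simp only [List.cons_append, pairCount, ih, List.count_append, List.count_nil,
      List.count_cons]
    have h : (x == B - y) = (y == B - x) := by
      by_cases h : x = B - y
      · have h' : y = B - x := by omega
        have l1 : (x == B - y) = true := by simp [h]
        have l2 : (y == B - x) = true := by simp [h']
        rw [l1, l2]
      · have h' : ¬ (y = B - x) := by omega
        have l1 : (x == B - y) = false := by simp [h]
        have l2 : (y == B - x) = false := by simp [h']
        rw [l1, l2]
    rw [h]
    push_cast
    ring

theorem delta_sum (l : List Int) (B x : Int) :
    (if x < B - x then (l.count (B - x) : Int)
     else if x = B - x then (l.count x : Int) else 0)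
    + (if (B - x) ∈ l ∧ B - x ≠ x then (if B - x < x then (l.count (B - x) : Int) else 0) else 0)
    = (l.count (B - x) : Int) := by
  rcases lt_trichotomy x (B - x) with h | h | h
  · rw [if_pos h, if_neg (by omega : ¬ B - x < x)]
    simp
  · rw [if_neg (by omega : ¬ x < B - x), if_pos h,
      if_neg (by simp [show B - x = x from h.symm] : ¬ ((B - x) ∈ l ∧ B - x ≠ x)),
      show B - x = x from h.symm]
    ring
  · rw [if_neg (by omega : ¬ x < B - x), if_neg (by omega : ¬ x = B - x)]
    by_cases hm : (B - x) ∈ l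
    · rw [if_pos ⟨hm, by omega⟩, if_pos h]
      ring
    · rw [if_neg (fun hc => hm hc.1)]
      have : l.count (B - x) = 0 := List.count_eq_zero.mpr hm
      rw [this]
      ring

theorem Fc_not_mem (l : List Int) (B x : Int) (hx : x ∉ l) : Fc l B x = 0 := by
  unfold Fc
  have h0 : l.count x = 0 := List.count_eq_zero.mpr hx
  rw [h0]
  split_ifs <;> norm_num

theorem sum_Fc_eq_pairCount (l : List Int) (B : Int) :
    ((PySem.List.dedup l).map (Fc l B)).sum = pairCount B l := by
  induction l using List.reverseRecOn with
  | nil => simp [pairCount, PySem.List.dedup]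
  | append_singleton l x ih =>
    rw [pairCount_append, dedup_append_singleton]
    have hFc : ∀ D : List Int, (D.map (Fc (l ++ [x]) B)).sum
        = (D.map (Fc l B)).sum + (D.map (fun v =>
            if v = x then
              (if x < B - x then (l.count (B - x) : Int)
               else if x = B - x then (l.count x : Int) else 0)
            else if v = B - x then (if B - x < x then (l.count (B - x) : Int) else 0)
            else 0)).sum := by
      intro D
      rw [← PySem.List.sum_map_add_int]
      exact congrArg _ (List.map_congr_left (fun v _ => Fc_append l B x v))
    by_cases hx : x ∈ l
    · rw [if_pos hx, hFc, ih,
        sum_map_two_ite _ (PySem.List.nodup_dedup l) x (B - x) _ _,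
        if_pos ((PySem.List.mem_dedup l x).mpr hx)]
      have hmem : (B - x ∈ PySem.List.dedup l ∧ B - x ≠ x) ↔ ((B - x) ∈ l ∧ B - x ≠ x) := by
        rw [PySem.List.mem_dedup]
      rw [if_congr hmem rfl rfl]
      linarith [delta_sum l B x]
    · rw [if_neg hx, List.map_append, List.sum_append, hFc, ih,
        sum_map_two_ite _ (PySem.List.nodup_dedup l) x (B - x) _ _,
        if_neg (fun hc => hx ((PySem.List.mem_dedup l x).mp hc))]
      have hmem : (B - x ∈ PySem.List.dedup l ∧ B - x ≠ x) ↔ ((B - x) ∈ l ∧ B - x ≠ x) := by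
        rw [PySem.List.mem_dedup]
      rw [if_congr hmem rfl rfl]
      simp only [List.map_cons, List.map_nil, List.sum_cons, List.sum_nil]
      rw [Fc_append, Fc_not_mem l B x hx, if_pos rfl]
      linarith [delta_sum l B x]

theorem solve_alt_eq_pairCount (A : List Int) (B : Int) :
    solve_alt A B = pairCount B A % (10 ^ 9 + 7) := by
  have h1 : solve_alt A B = (((PySem.Dict.counter A : PySem.Dict Int Int).items).foldl (fun tot p =>
      if p.1 < B - p.1 then tot + p.2 * (PySem.Dict.counter A : PySem.Dict Int Int).getD (B - p.1) 0
      else if p.1 = B - p.1 then tot + PySem.Int.floordiv (p.2 * (p.2 - 1)) 2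
      else tot) 0) % (10 ^ 9 + 7) := by
    unfold solve_alt
    rw [PySem.Dict.foldl_insert_getD_add_one_eq_counter]
  rw [h1, PySem.Dict.items_counter, List.foldl_map]
  have h2 : ∀ (tot : Int) (k : Int), k ∈ PySem.Set.ofList A →
      ((fun (tot : Int) (p : Int × Int) =>
        if p.1 < B - p.1 then tot + p.2 * (PySem.Dict.counter A : PySem.Dict Int Int).getD (B - p.1) 0
        else if p.1 = B - p.1 then tot + PySem.Int.floordiv (p.2 * (p.2 - 1)) 2
        else tot) tot ((fun k => (k, (A.count k : Int))) k))
      = tot + Fc A B k := by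
    intro tot k _
    simp only [PySem.Dict.getD_counter, Fc]
    split_ifs <;> ring
  congr 1
  calc ((PySem.Set.ofList A).foldl (fun (tot : Int) (k : Int) =>
        (fun (tot : Int) (p : Int × Int) =>
          if p.1 < B - p.1 then tot + p.2 * (PySem.Dict.counter A : PySem.Dict Int Int).getD (B - p.1) 0
          else if p.1 = B - p.1 then tot + PySem.Int.floordiv (p.2 * (p.2 - 1)) 2
          else tot) tot ((fun k => (k, (A.count k : Int))) k)) 0)
      = (PySem.Set.ofList A).foldl (fun tot k => tot + Fc A B k) 0 :=
        PySem.List.foldl_congr_mem _ _ _ _ (fun acc x hx => h2 acc x hx)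
    _ = 0 + ((PySem.Set.ofList A).map (Fc A B)).sum := PySem.List.foldl_add _ _ _
    _ = pairCount B A := by
        rw [zero_add, ← PySem.List.dedup_eq_ofList, sum_Fc_eq_pairCount]

-- ===== VERDICT (by name: the statement is the Claim_ definition above) =====
theorem solve_spec : Claim_equal_solve := by
  intro A B _
  unfold Spec_solve
  rw [solve_eq_pairCount, solve_alt_eq_pairCount]
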